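-- pv_equiv track=rewrite | github.com/yesref/TurkishSL | util/preprocess.py | get_batch_lengths
-- ===== SOURCE A (Python) =====
-- def get_batch_lengths(dataset):
--     dataset.sort(key=lambda d: len(d[1]))
--
--     batch_length = len(dataset[0][0])
--     batch_lengths = []
--
--     for i in range(len(dataset)):
--         length = len(dataset[i][0])
--         if length > batch_length:
--             batch_lengths.append(i)
--             batch_length = length
--
--     return dataset, batch_lengths
-- ===== SOURCE B (Python) =====
-- # B: same in-place sort, then a prefix-maxima table + adjacent-pair scan instead of
-- # A's single running-max accumulator loop (objective: alternative decomposition; same cost).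
-- # Note: like A, this sorts `dataset` in place (observable mutation); on an empty dataset
-- # A raises IndexError while B returns (dataset, []).
-- def get_batch_lengths(dataset):
--     dataset.sort(key=lambda d: len(d[1]))
--     lens = [len(d[0]) for d in dataset]
--     prefix = lens[:1]
--     for x in lens[1:]:
--         m = prefix[-1]
--         prefix.append(x if x > m else m)
--     batch_lengths = [i for i, (p, q) in enumerate(zip(prefix, prefix[1:]), 1) if q > p]
--     return dataset, batch_lengths
-- ===== Notes on version B (the rewrite author's own statement) =====
-- stated objective: alternative
-- what changed: Replaces A's single-pass running-max accumulator loop over indices with a two-phase decomposition: build a prefix-maxima table, then select indices by scanning adjacent pairs of that table with enumerate/zip.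
import Mathlib
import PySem

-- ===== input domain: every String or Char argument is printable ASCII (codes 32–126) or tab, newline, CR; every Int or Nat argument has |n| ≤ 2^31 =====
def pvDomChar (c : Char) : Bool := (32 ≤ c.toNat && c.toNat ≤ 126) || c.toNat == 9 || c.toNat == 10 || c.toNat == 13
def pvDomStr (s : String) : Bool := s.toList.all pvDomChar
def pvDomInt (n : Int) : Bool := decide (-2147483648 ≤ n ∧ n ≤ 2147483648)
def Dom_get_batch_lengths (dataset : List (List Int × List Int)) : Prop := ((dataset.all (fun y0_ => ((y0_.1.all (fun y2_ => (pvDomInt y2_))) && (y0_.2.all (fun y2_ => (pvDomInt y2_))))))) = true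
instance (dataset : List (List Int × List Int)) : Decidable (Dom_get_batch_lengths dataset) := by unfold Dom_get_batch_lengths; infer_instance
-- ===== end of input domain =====

-- B replaces A's running-max accumulator loop by a prefix-maxima table scanned in adjacent
-- pairs (objective: alternative decomposition, same cost). Both versions sort the argument
-- in place in Python; the equivalence proved here is about the return value.

-- ===== PORT A =====
def get_batch_lengths (dataset : List (List Int × List Int)) : (List (List Int × List Int)) × List Int :=
  let ds := PySem.List.sorted dataset (fun d => (d.2.length : Int)) false
  let batch_length : Int := ((PySem.List.pyGetD ds 0 ([], [])).1.length : Int)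
  let st := (PySem.List.pyRange 0 (PySem.List.len ds) 1).foldl
    (fun (st : Int × List Int) i =>
      let length : Int := ((PySem.List.pyGetD ds i ([], [])).1.length : Int)
      if length > st.1 then (length, st.2 ++ [i]) else st)
    (batch_length, [])
  (ds, st.2)

-- ===== PORT B =====
def get_batch_lengths_alt (dataset : List (List Int × List Int)) : (List (List Int × List Int)) × List Int :=
  let ds := PySem.List.sorted dataset (fun d => (d.2.length : Int)) false
  let lens := ds.map (fun d => (d.1.length : Int))
  let pfx := (lens.drop 1).foldl
    (fun acc x =>
      let m := PySem.List.pyGetD acc (-1) 0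
      acc ++ [if x > m then x else m])
    (lens.take 1)
  let batch_lengths := ((PySem.List.enumerate (pfx.zip (pfx.drop 1)) 1).filter
      (fun p => p.2.2 > p.2.1)).map (·.1)
  (ds, batch_lengths)

-- ===== PRECONDITION & SPEC =====
-- Pre_ excludes only the empty dataset, on which A raises IndexError (dataset[0][0]).
def Pre_get_batch_lengths (dataset : List (List Int × List Int)) : Prop := dataset ≠ []
instance (dataset : List (List Int × List Int)) : Decidable (Pre_get_batch_lengths dataset) := by unfold Pre_get_batch_lengths; infer_instance
def pvWitness_get_batch_lengths : (List (List Int × List Int)) := [([1], [2]), ([3, 4], [])]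

def Spec_get_batch_lengths (dataset : List (List Int × List Int)) (out : (List (List Int × List Int)) × List Int) : Prop := out = get_batch_lengths_alt dataset
instance (dataset : List (List Int × List Int)) (out : (List (List Int × List Int)) × List Int) : Decidable (Spec_get_batch_lengths dataset out) := by unfold Spec_get_batch_lengths; infer_instance

-- ===== CLAIM (what is proved, stated in full; the proofs are below) =====
def Claim_equal_get_batch_lengths : Prop := ∀ (dataset : List (List Int × List Int)), Dom_get_batch_lengths dataset → Pre_get_batch_lengths dataset → Spec_get_batch_lengths dataset (get_batch_lengths dataset)

-- ===== LEMMAS AND PROOFS =====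

/-- Indices (counting from `s`) at which an element strictly exceeds the running max `m`. -/
def pvSel (s m : Int) : List Int → List Int
  | [] => []
  | l :: ls => if l > m then s :: pvSel (s + 1) l ls else pvSel (s + 1) m ls

/-- Prefix-maxima list of `m :: ls`. -/
def pvPmax (m : Int) : List Int → List Int
  | [] => [m]
  | l :: ls => m :: pvPmax (max m l) ls

lemma pvAfold (ls : List Int) : ∀ (s m : Int) (out : List Int),
    ((PySem.List.enumerate ls s).foldl
      (fun (st : Int × List Int) p => if p.2 > st.1 then (p.2, st.2 ++ [p.1]) else st)
      (m, out)).2 = out ++ pvSel s m ls := by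
  induction ls with
  | nil => intro s m out; simp [PySem.List.enumerate_nil, pvSel]
  | cons l ls ih =>
    intro s m out
    rw [PySem.List.enumerate_cons]
    simp only [List.foldl_cons, pvSel]
    by_cases h : l > m
    · simp only [if_pos h, ih]
      simp
    · simp only [if_neg h, ih]

lemma pvBfold (ls : List Int) : ∀ (acc : List Int) (m : Int),
    ls.foldl
      (fun acc x =>
        acc ++ [if x > PySem.List.pyGetD acc (-1) 0 then x else PySem.List.pyGetD acc (-1) 0])
      (acc ++ [m]) = acc ++ pvPmax m ls := by
  induction ls with
  | nil => intro acc m; simp [pvPmax]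
  | cons x ls ih =>
    intro acc m
    rw [List.foldl_cons, PySem.List.pyGetD_neg_one_append_singleton, ih (acc ++ [m])]
    have hmax : (if x > m then x else m) = max m x := by split <;> omega
    simp [hmax, pvPmax]

lemma pvBsel (ls : List Int) : ∀ (m s : Int),
    ((PySem.List.enumerate ((pvPmax m ls).zip ((pvPmax m ls).drop 1)) s).filter
        (fun p => p.2.2 > p.2.1)).map (·.1) = pvSel s m ls := by
  induction ls with
  | nil => intro m s; simp [pvPmax, PySem.List.enumerate_nil, pvSel]
  | cons l ls ih =>
    intro m s
    obtain ⟨t, ht⟩ : ∃ t, pvPmax (max m l) ls = max m l :: t := by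
      cases ls <;> exact ⟨_, rfl⟩
    have hzip : (m :: pvPmax (max m l) ls).zip ((m :: pvPmax (max m l) ls).drop 1)
        = (m, max m l) :: (pvPmax (max m l) ls).zip ((pvPmax (max m l) ls).drop 1) := by
      rw [ht]; rfl
    simp only [pvPmax]
    rw [hzip, PySem.List.enumerate_cons, List.filter_cons]
    by_cases h : l > m
    · have hml : max m l = l := by omega
      rw [hml]
      rw [if_pos (by simpa using h)]
      simp only [List.map_cons, ih l (s + 1), pvSel, if_pos h]
    · have hml : max m l = m := by omega
      rw [hml]
      rw [if_neg (by simp)]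
      rw [ih m (s + 1)]
      simp only [pvSel, if_neg h]

-- ===== VERDICT (by name: the statement is the Claim_ definition above) =====
theorem get_batch_lengths_spec : Claim_equal_get_batch_lengths := by
  intro dataset _ hpre
  unfold Spec_get_batch_lengths get_batch_lengths get_batch_lengths_alt
  set ds := PySem.List.sorted dataset (fun d => (d.2.length : Int)) false with hds
  have hne : ds ≠ [] := by
    intro h
    apply hpre
    have hlen := PySem.List.length_sorted (xs := dataset) (key := fun d => (d.2.length : Int)) (rev := false)
    rw [← hds, h] at hlen
    exact List.eq_nil_of_length_eq_zero hlen.symm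
  obtain ⟨d, rest, hcons⟩ := List.exists_cons_of_ne_nil hne
  rw [hcons]
  simp only [List.map_cons, List.take_succ_cons, List.take_zero, List.drop_succ_cons,
    List.drop_zero, PySem.List.pyGetD_zero_cons]
  -- A side: indices into `ds` become indices into the length list `lens`
  have hget : ∀ i : Int, ((PySem.List.pyGetD (d :: rest) i ([], [])).1.length : Int)
      = PySem.List.pyGetD ((d :: rest).map (fun d => (d.1.length : Int))) i 0 := by
    intro i
    have h := PySem.List.pyGetD_map (fun d : List Int × List Int => (d.1.length : Int)) (d :: rest) i ([], [])
    simpa using h.symm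
  simp only [hget]
  have henum := PySem.List.enumerate_eq_map_pyRange ((d :: rest).map (fun d => (d.1.length : Int))) 0
  have hlen : PySem.List.len ((d :: rest).map (fun d : List Int × List Int => (d.1.length : Int)))
      = PySem.List.len (d :: rest) := by simp
  rw [hlen] at henum
  have hchain : (PySem.List.pyRange 0 (PySem.List.len (d :: rest)) 1).foldl
      (fun (st : Int × List Int) i =>
        if PySem.List.pyGetD ((d :: rest).map (fun d => (d.1.length : Int))) i 0 > st.1 then
          (PySem.List.pyGetD ((d :: rest).map (fun d => (d.1.length : Int))) i 0, st.2 ++ [i])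
        else st) ((d.1.length : Int), [])
      = (PySem.List.enumerate ((d :: rest).map (fun d => (d.1.length : Int))) 0).foldl
          (fun (st : Int × List Int) p => if p.2 > st.1 then (p.2, st.2 ++ [p.1]) else st)
          ((d.1.length : Int), []) := by
    rw [henum, List.foldl_map]
  rw [hchain]
  -- B side: the appended prefix table is the prefix-maxima list
  have hB := pvBfold (rest.map (fun d : List Int × List Int => (d.1.length : Int))) [] ((d.1.length : Int))
  simp only [List.nil_append] at hB
  rw [hB, pvBsel]
  simp only [List.map_cons, PySem.List.enumerate_cons, List.foldl_cons, zero_add]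
  simp [pvAfold]
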